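-- pv_equiv track=rewrite | github.com/risyadrahmadi/Soal-Tes-ke-2-Bacek-End | soal3_count_query/count_query.py | count_queries
-- ===== SOURCE A (Python) =====
-- def count_queries(INPUT, QUERY):
--     # Membuat dictionary untuk menghitung frekuensi kata dalam INPUT
--     freq = {}
--     for word in INPUT:
--         if word in freq:
--             freq[word] += 1
--         else:
--             freq[word] = 1
--
--     # Menghitung jumlah kemunculan setiap query
--     result = []
--     for q in QUERY:
--         count = freq.get(q, 0)
--         result.append(count)
--
--     return result
-- ===== SOURCE B (Python) =====
-- def count_queries(INPUT, QUERY):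
--     # Sort INPUT once, then answer each query by binary search:
--     # count(q) = (first index with element > q) - (first index with element >= q).
--     s = sorted(INPUT)
--
--     def boundary(go_right):
--         # go_right is downward-closed on the sorted list; return the first
--         # index where it fails (len(s) if it never fails).
--         lo, hi = 0, len(s)
--         while lo < hi:
--             mid = (lo + hi) // 2
--             if go_right(s[mid]):
--                 lo = mid + 1
--             else:
--                 hi = mid
--         return lo
--
--     return [boundary(lambda x: x <= q) - boundary(lambda x: x < q) for q in QUERY]
-- ===== Notes on version B (the rewrite author's own statement) =====
-- stated objective: alternative
-- what changed: Replaces the hash-style frequency dictionary with sort-then-binary-search: INPUT is sorted once and each query's count is the difference of two hand-written binary-search boundaries (first index > q minus first index >= q).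
import Mathlib
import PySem

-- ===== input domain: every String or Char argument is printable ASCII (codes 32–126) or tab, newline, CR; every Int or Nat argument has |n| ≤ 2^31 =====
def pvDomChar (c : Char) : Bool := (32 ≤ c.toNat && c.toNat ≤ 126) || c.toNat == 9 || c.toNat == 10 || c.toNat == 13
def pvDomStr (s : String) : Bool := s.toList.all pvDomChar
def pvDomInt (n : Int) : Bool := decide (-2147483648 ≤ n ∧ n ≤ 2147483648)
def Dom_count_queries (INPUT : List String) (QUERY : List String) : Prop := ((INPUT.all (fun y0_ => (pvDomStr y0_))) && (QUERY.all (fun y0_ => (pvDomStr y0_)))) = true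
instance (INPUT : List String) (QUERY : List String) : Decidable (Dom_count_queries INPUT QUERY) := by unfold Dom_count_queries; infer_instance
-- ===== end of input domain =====

-- ===== PORT A =====
-- One honest line: B sorts INPUT once and answers each query with two hand-written
-- binary searches instead of building a frequency dictionary (alternative algorithm).
def count_queries (INPUT : List String) (QUERY : List String) : List Int :=
  let freq := INPUT.foldl (fun d word =>
    if d.contains word then d.modify word 0 (· + 1) else d.insert word 1)
    (PySem.Dict.empty : PySem.Dict String Int)
  QUERY.foldl (fun result q => result ++ [freq.getD q 0]) []

-- ===== PORT B =====
-- boundary(go_right): binary search in the sorted list s for the first index where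
-- go_right fails.  s[mid] in Source B is always in range (0 ≤ lo ≤ mid < hi ≤ len s),
-- so List.getD with a dummy default is an exact port of the indexing.
def cqBoundary (s : List String) (goRight : String → Bool) (lo hi : Nat) : Nat :=
  if h : lo < hi then
    let mid := (lo + hi) / 2
    if goRight (s.getD mid "") then cqBoundary s goRight (mid + 1) hi
    else cqBoundary s goRight lo mid
  else lo
termination_by hi - lo
decreasing_by all_goals omega

def count_queries_alt (INPUT : List String) (QUERY : List String) : List Int :=
  let s := PySem.List.sorted INPUT (fun x => x) false
  QUERY.map (fun q =>
    (cqBoundary s (fun x => decide (x ≤ q)) 0 s.length : Int)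
      - (cqBoundary s (fun x => decide (x < q)) 0 s.length : Int))

-- ===== PRECONDITION & SPEC =====
def Spec_count_queries (INPUT : List String) (QUERY : List String) (out : List Int) : Prop := out = count_queries_alt INPUT QUERY
instance (INPUT : List String) (QUERY : List String) (out : List Int) : Decidable (Spec_count_queries INPUT QUERY out) := by unfold Spec_count_queries; infer_instance

-- ===== CLAIM (what is proved, stated in full; the proofs are below) =====
def Claim_equal_count_queries : Prop := ∀ (INPUT : List String) (QUERY : List String), Dom_count_queries INPUT QUERY → Spec_count_queries INPUT QUERY (count_queries INPUT QUERY)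

-- ===== LEMMAS AND PROOFS =====

-- A-side: the dict step is a plain counter increment.
lemma step_eq (d : PySem.Dict String Int) (w : String) :
    (if d.contains w then d.modify w 0 (· + 1) else d.insert w 1) = d.modify w 0 (· + 1) := by
  by_cases h : d.contains w = true
  · simp [h]
  · have h' : d.contains w = false := by simpa using h
    have hc : (d.items.any fun p => p.1 == w) = false := by
      simpa [PySem.Dict.contains] using h'
    have hf : d.items.find? (fun p => p.1 == w) = none := by
      rw [List.find?_eq_none]
      intro x hx
      exact List.any_eq_false.mp hc x hx
    have h0 : d.getD w 0 = 0 := by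
      simp [PySem.Dict.getD, PySem.Dict.get?, hf]
    simp [PySem.Dict.modify, PySem.Dict.insert, PySem.Dict.contains, hc, h0]

lemma freq_getD (INPUT : List String) (v : String) :
    (INPUT.foldl (fun d word =>
      if d.contains word then d.modify word 0 (· + 1) else d.insert word 1)
      (PySem.Dict.empty : PySem.Dict String Int)).getD v 0 = INPUT.count v := by
  have he : INPUT.foldl (fun d word =>
      if d.contains word then d.modify word 0 (· + 1) else d.insert word 1)
      (PySem.Dict.empty : PySem.Dict String Int)
      = INPUT.foldl (fun d w => d.modify w 0 (· + 1)) PySem.Dict.empty := by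
    apply PySem.List.foldl_congr_mem
    intro acc x _
    exact step_eq acc x
  rw [he, PySem.Dict.getD_foldl_modify_add_one]
  simp [PySem.Dict.empty, PySem.Dict.getD, PySem.Dict.get?]

lemma foldl_append_map {α β : Type} (f : α → β) (l : List α) (acc : List β) :
    l.foldl (fun r q => r ++ [f q]) acc = acc ++ l.map f := by
  induction l generalizing acc with
  | nil => simp
  | cons x xs ih => simp [List.foldl, ih]

-- B-side: the binary search finds the boundary of a downward-closed predicate.
lemma boundary_spec (s : List String) (p : String → Bool)
    (hmono : ∀ i j, i ≤ j → j < s.length → p (s.getD j "") = true → p (s.getD i "") = true) :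
    ∀ fuel lo hi, hi - lo ≤ fuel → lo ≤ hi → hi ≤ s.length →
      (∀ i, i < lo → p (s.getD i "") = true) →
      (∀ i, hi ≤ i → i < s.length → p (s.getD i "") = false) →
      cqBoundary s p lo hi ≤ s.length ∧
      (∀ i, i < cqBoundary s p lo hi → p (s.getD i "") = true) ∧
      (∀ i, cqBoundary s p lo hi ≤ i → i < s.length → p (s.getD i "") = false) := by
  intro fuel
  induction fuel with
  | zero =>
    intro lo hi hf hlh hhl hpre hpost
    have hle : hi = lo := by omega
    rw [cqBoundary]
    simp only [hle, lt_irrefl, dite_false]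
    exact ⟨by omega, fun i hi' => hpre i hi', fun i hli hilen => hpost i (by omega) hilen⟩
  | succ n ih =>
    intro lo hi hf hlh hhl hpre hpost
    rw [cqBoundary]
    by_cases h : lo < hi
    · simp only [h, dite_true]
      have hmidlt : (lo + hi) / 2 < hi := by omega
      have hmidge : lo ≤ (lo + hi) / 2 := by omega
      by_cases hg : p (s.getD ((lo + hi) / 2) "") = true
      · simp only [hg, if_true]
        apply ih ((lo + hi) / 2 + 1) hi (by omega) (by omega) hhl
        · intro i hi'
          exact hmono i ((lo + hi) / 2) (by omega) (by omega) hg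
        · exact hpost
      · simp only [hg, Bool.false_eq_true, if_false]
        apply ih lo ((lo + hi) / 2) (by omega) hmidge (by omega) hpre
        intro i hmi hilen
        by_cases hp : p (s.getD i "") = true
        · exact absurd (hmono ((lo + hi) / 2) i hmi hilen hp) hg
        · simpa using hp
    · simp only [h, dite_false]
      have hle : hi = lo := by omega
      exact ⟨by omega, fun i hi' => hpre i hi', fun i hli hilen => hpost i (by omega) hilen⟩

-- a split point determines countP
lemma countP_eq_of_split (p : String → Bool) :
    ∀ (s : List String) (r : Nat), r ≤ s.length →
      (∀ i, i < r → p (s.getD i "") = true) →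
      (∀ i, r ≤ i → i < s.length → p (s.getD i "") = false) →
      s.countP p = r := by
  intro s
  induction s with
  | nil =>
    intro r hr _ _
    simp only [List.length_nil, Nat.le_zero] at hr
    simp [hr]
  | cons x xs ih =>
    intro r hr hpre hpost
    cases r with
    | zero =>
      have hx : p x = false := hpost 0 (by omega) (by simp)
      have : xs.countP p = 0 := by
        apply ih 0 (by omega) (fun i hi => by omega)
        intro i _ hilen
        exact hpost (i + 1) (by omega) (by simpa using Nat.succ_lt_succ hilen)
      simp [hx, this]
    | succ r' =>
      have hx : p x = true := hpre 0 (by omega)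
      have : xs.countP p = r' := by
        apply ih r' (by simpa using hr)
        · intro i hi
          exact hpre (i + 1) (by omega)
        · intro i hi hilen
          exact hpost (i + 1) (by omega) (by simpa using Nat.succ_lt_succ hilen)
      simp [hx, this]

lemma sorted_getD_mono (s : List String) (hs : s.Pairwise (· ≤ ·)) (i j : Nat)
    (hij : i ≤ j) (hj : j < s.length) : s.getD i "" ≤ s.getD j "" := by
  rcases Nat.eq_or_lt_of_le hij with rfl | hlt
  · exact le_refl _
  · have hi : i < s.length := by omega
    rw [List.getD_eq_getElem s _ hi, List.getD_eq_getElem s _ hj]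
    exact (List.pairwise_iff_getElem.mp hs) i j hi hj hlt

lemma boundary_countP (s : List String) (p : String → Bool)
    (hmono : ∀ i j, i ≤ j → j < s.length → p (s.getD j "") = true → p (s.getD i "") = true) :
    cqBoundary s p 0 s.length = s.countP p := by
  obtain ⟨h1, h2, h3⟩ := boundary_spec s p hmono s.length 0 s.length (by omega) (by omega)
    (le_refl _) (fun i hi => by omega) (fun i hli hilen => by omega)
  exact (countP_eq_of_split p s _ h1 h2 h3).symm

lemma countP_le_split (s : List String) (q : String) :
    s.countP (fun x => decide (x ≤ q)) = s.countP (fun x => decide (x < q)) + s.count q := by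
  induction s with
  | nil => simp
  | cons x xs ih =>
    rw [List.countP_cons, List.countP_cons, List.count_cons, ih]
    rcases lt_trichotomy x q with hlt | heq | hgt
    · have h1 : (decide (x ≤ q)) = true := decide_eq_true (le_of_lt hlt)
      have h2 : (decide (x < q)) = true := decide_eq_true hlt
      have h3 : (x == q) = false := beq_eq_false_iff_ne.mpr (ne_of_lt hlt)
      rw [h1, h2, h3]
      simp only [Bool.false_eq_true, if_true, if_false]
      omega
    · subst heq
      have h1 : (decide (x ≤ x)) = true := decide_eq_true (le_refl x)
      have h2 : (decide (x < x)) = false := decide_eq_false (lt_irrefl x)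
      have h3 : (x == x) = true := beq_self_eq_true x
      rw [h1, h2, h3]
      simp only [Bool.false_eq_true, if_true, if_false]
      omega
    · have h1 : (decide (x ≤ q)) = false := decide_eq_false (not_le.mpr hgt)
      have h2 : (decide (x < q)) = false := decide_eq_false (asymm hgt)
      have h3 : (x == q) = false := beq_eq_false_iff_ne.mpr (ne_of_gt hgt)
      rw [h1, h2, h3]
      simp only [Bool.false_eq_true, if_false]
      omega

lemma alt_entry (INPUT : List String) (q : String) :
    (cqBoundary (PySem.List.sorted INPUT (fun x => x) false) (fun x => decide (x ≤ q)) 0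
        (PySem.List.sorted INPUT (fun x => x) false).length : Int)
      - (cqBoundary (PySem.List.sorted INPUT (fun x => x) false) (fun x => decide (x < q)) 0
        (PySem.List.sorted INPUT (fun x => x) false).length : Int)
      = (INPUT.count q : Int) := by
  set s := PySem.List.sorted INPUT (fun x => x) false with hsdef
  have hs : s.Pairwise (· ≤ ·) := by
    simpa using PySem.List.sorted_pairwise INPUT (fun x => x)
  have hperm : s.Perm INPUT := PySem.List.sorted_perm INPUT (fun x => x) false
  have hle : cqBoundary s (fun x => decide (x ≤ q)) 0 s.length
      = s.countP (fun x => decide (x ≤ q)) := by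
    apply boundary_countP
    intro i j hij hj hp
    have := sorted_getD_mono s hs i j hij hj
    simp only [decide_eq_true_eq] at hp ⊢
    exact le_trans this hp
  have hlt : cqBoundary s (fun x => decide (x < q)) 0 s.length
      = s.countP (fun x => decide (x < q)) := by
    apply boundary_countP
    intro i j hij hj hp
    have := sorted_getD_mono s hs i j hij hj
    simp only [decide_eq_true_eq] at hp ⊢
    exact lt_of_le_of_lt this hp
  rw [hle, hlt, countP_le_split s q, hperm.count_eq q]
  push_cast
  ring

-- ===== VERDICT (by name: the statement is the Claim_ definition above) =====
theorem count_queries_spec : Claim_equal_count_queries := by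
  intro INPUT QUERY _
  unfold Spec_count_queries count_queries count_queries_alt
  rw [foldl_append_map]
  simp only [List.nil_append, List.map_inj_left]
  intro q _
  rw [freq_getD]
  exact (alt_entry INPUT q).symm
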